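-- pv_equiv track=rewrite | github.com/phisanti/napari-cocoutils | src/napari_cocoutils/_utils.py | validate_coco_structure
-- ===== SOURCE A (Python) =====
-- from typing import Dict, List, Any, Optional, Union, Tuple, Protocol
--
-- def validate_coco_structure(data: Optional[Dict[str, Any]]) -> bool:
--     """
--     Validate that dictionary contains valid COCO structure.
--
--     Parameters
--     ----------
--     data : dict
--         Dictionary to validate as COCO format
--
--     Returns
--     -------
--     bool
--         True if valid COCO structure, False otherwise
--     """
--     if data is None:
--         return False
--
--     required_fields = ['images', 'annotations', 'categories']
--     for field in required_fields:
--         if field not in data: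
--             return False
--         if not isinstance(data[field], list):
--             return False
--
--     try:
--         for img in data['images']:
--             if not all(key in img for key in ['id', 'file_name', 'width', 'height']):
--                 return False
--
--         for ann in data['annotations']:
--             if not all(key in ann for key in ['id', 'image_id', 'category_id']):
--                 return False
--
--         for cat in data['categories']:
--             if not all(key in cat for key in ['id', 'name']):
--                 return False
--
--         return True
--     except (KeyError, TypeError):
--         return False
-- ===== SOURCE B (Python) =====
-- def validate_coco_structure(data):
--     if data is None:
--         return False
--     # single pass over the data's own entries, popping from a "missing schema" dict
--     missing = {
--         'images': ('id', 'file_name', 'width', 'height'),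
--         'annotations': ('id', 'image_id', 'category_id'),
--         'categories': ('id', 'name'),
--     }
--     for field, value in data.items():
--         keys = missing.pop(field, None)
--         if keys is None:
--             continue
--         if not isinstance(value, list):
--             return False
--         try:
--             for item in value:
--                 for k in keys:
--                     if k not in item:
--                         return False
--         except TypeError:
--             return False
--     return not missing
-- ===== Notes on version B (the rewrite author's own statement) =====
-- stated objective: alternative
-- what changed: Instead of A's schema-driven passes (loop over required fields plus three separate per-section element loops over lookups into data), B makes one pass over the data's own entries, popping each matched field from a 'missing schema' dict and validating its value on the spot, and returns whether the missing-dict is empty.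
import Mathlib
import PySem

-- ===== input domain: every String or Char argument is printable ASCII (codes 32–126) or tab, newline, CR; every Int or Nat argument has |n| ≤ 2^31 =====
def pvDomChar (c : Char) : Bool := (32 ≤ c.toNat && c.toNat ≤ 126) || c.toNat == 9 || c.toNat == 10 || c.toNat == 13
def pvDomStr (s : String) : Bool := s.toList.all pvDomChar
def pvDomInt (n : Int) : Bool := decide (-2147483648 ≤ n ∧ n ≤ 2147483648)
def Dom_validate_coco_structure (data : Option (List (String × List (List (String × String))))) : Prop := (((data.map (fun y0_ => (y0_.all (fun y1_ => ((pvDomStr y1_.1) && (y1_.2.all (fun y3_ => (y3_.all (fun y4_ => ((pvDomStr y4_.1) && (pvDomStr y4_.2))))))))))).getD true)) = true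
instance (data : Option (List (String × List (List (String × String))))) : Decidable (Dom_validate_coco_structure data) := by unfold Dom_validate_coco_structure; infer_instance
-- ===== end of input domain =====

-- B replaces A's schema-driven passes (field loop + three per-section loops) by ONE pass over the
-- data's own entries that pops each matched field from a "missing schema" dict and finally tests
-- that the dict is empty; return value only, no mutation.

-- ===== PORT A =====
-- literal port of A; under the typed domain every dict value is a list, so the
-- `isinstance(data[field], list)` test is identically true and the try/except is unreachable.
def validate_coco_structure (data : Option (List (String × List (List (String × String))))) : Bool :=
  match data with
  | none => false
  | some d =>
    -- for field in required_fields: if field not in data: return False (isinstance always true here)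
    if !(["images", "annotations", "categories"].all (fun f => (PySem.Dict.get? (PySem.Dict.mk d) f).isSome)) then
      false
    else
      if !(((PySem.Dict.get? (PySem.Dict.mk d) "images").getD []).all (fun img =>
            ["id", "file_name", "width", "height"].all (fun k => (PySem.Dict.mk img).contains k))) then
        false
      else if !(((PySem.Dict.get? (PySem.Dict.mk d) "annotations").getD []).all (fun ann =>
            ["id", "image_id", "category_id"].all (fun k => (PySem.Dict.mk ann).contains k))) then
        false
      else if !(((PySem.Dict.get? (PySem.Dict.mk d) "categories").getD []).all (fun cat =>
            ["id", "name"].all (fun k => (PySem.Dict.mk cat).contains k))) then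
        false
      else
        true

-- ===== PORT B =====
-- all(k in item for k in keys) over the elements of one section value
def pvCheckItems (keys : List String) (v : List (List (String × String))) : Bool :=
  v.all (fun item => keys.all (fun k => (PySem.Dict.mk item).contains k))

-- the `for field, value in data.items()` loop of Source B; `missing` is the shrinking schema dict,
-- `missing.pop(field, None)` is get? + erase; isinstance/try-except are identically true /
-- unreachable under the typed domain (every value is a list, `k in item` never raises).
def pvGo (missing : PySem.Dict String (List String)) :
    List (String × List (List (String × String))) → Bool
  | [] => missing.size == 0          -- return not missing
  | (f, v) :: rest =>
    match missing.get? f with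
    | none => pvGo missing rest      -- keys is None: continue
    | some keys =>
      if pvCheckItems keys v then pvGo (missing.erase f) rest else false

def pvSchema : List (String × List String) :=
  [("images", ["id", "file_name", "width", "height"]),
   ("annotations", ["id", "image_id", "category_id"]),
   ("categories", ["id", "name"])]

def validate_coco_structure_alt (data : Option (List (String × List (List (String × String))))) : Bool :=
  match data with
  | none => false
  | some d => pvGo (PySem.Dict.mk pvSchema) d

-- ===== PRECONDITION & SPEC =====
def Spec_validate_coco_structure (data : Option (List (String × List (List (String × String))))) (out : Bool) : Prop := out = validate_coco_structure_alt data
instance (data : Option (List (String × List (List (String × String))))) (out : Bool) : Decidable (Spec_validate_coco_structure data out) := by unfold Spec_validate_coco_structure; infer_instance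

-- ===== CLAIM (what is proved, stated in full; the proofs are below) =====
def Claim_equal_validate_coco_structure : Prop := ∀ (data : Option (List (String × List (List (String × String))))), Dom_validate_coco_structure data → Spec_validate_coco_structure data (validate_coco_structure data)

-- ===== LEMMAS AND PROOFS =====

-- "field f of the data d is present with a valid section value" (first-match lookup), for the proof only
def pvLookGood (d : List (String × List (List (String × String))))
    (fk : String × List String) : Bool :=
  match (PySem.Dict.mk d).get? fk.1 with
  | some v => pvCheckItems fk.2 v
  | none => false

theorem pvGo_eq (d : List (String × List (List (String × String)))) :
    ∀ m : List (String × List String), (m.map Prod.fst).Nodup →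
      pvGo (PySem.Dict.mk m) d = m.all (pvLookGood d) := by
  induction d with
  | nil =>
    intro m _
    cases m with
    | nil => rfl
    | cons p t =>
      simp [pvGo, PySem.Dict.size, pvLookGood, PySem.Dict.get?]
  | cons fv rest ih =>
    intro m hnd
    obtain ⟨f, v⟩ := fv
    cases hf : (PySem.Dict.mk m).get? f with
    | none =>
      have hne : ∀ p ∈ m, p.1 ≠ f := by
        intro p hp hpe
        have : (PySem.Dict.mk m).contains f = true :=
          List.any_eq_true.mpr ⟨p, hp, by simp [hpe]⟩
        rw [PySem.Dict.contains_eq_isSome_get?, hf] at this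
        simp at this
      have hcongr : ∀ p ∈ m, pvLookGood ((f, v) :: rest) p = pvLookGood rest p := by
        intro p hp
        have : (f == p.1) = false := by
          simp
          exact fun h => hne p hp h.symm
        simp [pvLookGood, PySem.Dict.get?_mk_cons, this]
      calc pvGo (PySem.Dict.mk m) ((f, v) :: rest)
          = pvGo (PySem.Dict.mk m) rest := by simp [pvGo, hf]
        _ = m.all (pvLookGood rest) := ih m hnd
        _ = m.all (pvLookGood ((f, v) :: rest)) := by
            apply Eq.symm
            apply Bool.eq_iff_iff.mpr
            simp only [List.all_eq_true]
            exact ⟨fun h p hp => (hcongr p hp).symm ▸ h p hp,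
                   fun h p hp => (hcongr p hp) ▸ h p hp⟩
    | some keys =>
      have hmem : (f, keys) ∈ m := PySem.Dict.mem_items_of_get?_eq_some _ hf
      have huniq : ∀ p ∈ m, p.1 = f → p = (f, keys) := by
        intro p hp hpe
        have h1 : m.map Prod.fst |>.Nodup := hnd
        -- two entries of m with the same first component are equal under Nodup of the keys
        exact List.inj_on_of_nodup_map h1 hp hmem (by simpa using hpe)
      cases hck : pvCheckItems keys v with
      | false =>
        have : pvLookGood ((f, v) :: rest) (f, keys) = false := by
          simp [pvLookGood, PySem.Dict.get?_mk_cons, hck]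
        have hall : m.all (pvLookGood ((f, v) :: rest)) = false := by
          cases h : m.all (pvLookGood ((f, v) :: rest)) with
          | false => rfl
          | true =>
            rw [List.all_eq_true] at h
            have := h (f, keys) hmem
            simp_all
        simp [pvGo, hf, hck, hall]
      | true =>
        have herase : (PySem.Dict.mk m).erase f
            = PySem.Dict.mk (m.filter (fun p => !(p.1 == f))) := rfl
        have hndf : ((m.filter (fun p => !(p.1 == f))).map Prod.fst).Nodup := by
          apply List.Nodup.sublist _ hnd
          exact List.Sublist.map Prod.fst List.filter_sublist
        have hstep : pvGo (PySem.Dict.mk m) ((f, v) :: rest)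
            = pvGo (PySem.Dict.mk (m.filter (fun p => !(p.1 == f)))) rest := by
          simp [pvGo, hf, hck, herase]
        rw [hstep, ih _ hndf]
        apply Bool.eq_iff_iff.mpr
        simp only [List.all_eq_true, List.mem_filter]
        constructor
        · intro h p hp
          by_cases hpe : p.1 = f
          · have hpk := huniq p hp hpe
            subst hpk
            simp [pvLookGood, PySem.Dict.get?_mk_cons, hck]
          · have hb : (f == p.1) = false := by
              simp; exact fun h' => hpe h'.symm
            have := h p ⟨hp, by simp [hpe]⟩
            simpa [pvLookGood, PySem.Dict.get?_mk_cons, hb] using this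
        · intro h p hp
          rcases hp with ⟨hp, hpf⟩
          have hpe : p.1 ≠ f := by simpa using hpf
          have hb : (f == p.1) = false := by
            simp; exact fun h' => hpe h'.symm
          have := h p hp
          simpa [pvLookGood, PySem.Dict.get?_mk_cons, hb] using this

-- ===== VERDICT (by name: the statement is the Claim_ definition above) =====
theorem validate_coco_structure_spec : Claim_equal_validate_coco_structure := by
  intro data _
  unfold Spec_validate_coco_structure
  cases data with
  | none => rfl
  | some d =>
    show validate_coco_structure (some d) = pvGo (PySem.Dict.mk pvSchema) d
    rw [pvGo_eq d pvSchema (by decide)]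
    unfold validate_coco_structure pvSchema pvLookGood pvCheckItems
    simp only [List.all_cons, List.all_nil]
    cases h1 : PySem.Dict.get? (PySem.Dict.mk d) "images" <;>
      cases h2 : PySem.Dict.get? (PySem.Dict.mk d) "annotations" <;>
        cases h3 : PySem.Dict.get? (PySem.Dict.mk d) "categories" <;>
          simp_all
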